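-- pv_equiv track=rewrite | github.com/kotama7/AI-Scientist-v2-HPC | ai_scientist/treesearch/utils/memory_viz.py | get_phases_for_branch_accumulated
-- ===== SOURCE A (Python) =====
-- def get_phases_for_branch_accumulated(events: list[dict], archival: list[dict]) -> list[str]:
--     """Get all phases from accumulated events and archival data."""
--     phases = set()
--
--     for event in events:
--         if event.get("phase"):
--             phases.add(event["phase"])
--
--     for record in archival:
--         if record.get("phase"):
--             phases.add(record["phase"])
--
--     if events or archival:
--         phases.add("summary")
--
--     return _sort_phases(phases)
--
-- def _sort_phases(phases: set[str]) -> list[str]: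
--     """Sort phases in canonical order."""
--     phase_order = ["phase0", "phase1", "phase2", "phase3", "phase4", "summary"]
--     sorted_phases = []
--     for p in phase_order:
--         if p in phases:
--             sorted_phases.append(p)
--     for p in sorted(phases):
--         if p not in sorted_phases:
--             sorted_phases.append(p)
--     return sorted_phases
-- ===== SOURCE B (Python) =====
-- def get_phases_for_branch_accumulated(events: list[dict], archival: list[dict]) -> list[str]:
--     """Get all phases from accumulated events and archival data."""
--     order = ["phase0", "phase1", "phase2", "phase3", "phase4", "summary"]
--     rank = {p: i for i, p in enumerate(order)}
--     phases = {r["phase"] for r in events + archival if r.get("phase")}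
--     if events or archival:
--         phases.add("summary")
--     return sorted(phases, key=lambda p: (rank.get(p, len(rank)), p))
-- ===== Notes on version B (the rewrite author's own statement) =====
-- stated objective: idiomatic
-- what changed: A's helper _sort_phases does a manual two-pass ordered insertion (walk the canonical phase list appending members, then append the remaining phases alphabetically, skipping duplicates by list membership); B replaces it with a single sorted() call keyed by (rank.get(p, len(rank)), p) over a rank dict built from the canonical list, and collects the phases with one set comprehension over events + archival instead of two loops.
import Mathlib
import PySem

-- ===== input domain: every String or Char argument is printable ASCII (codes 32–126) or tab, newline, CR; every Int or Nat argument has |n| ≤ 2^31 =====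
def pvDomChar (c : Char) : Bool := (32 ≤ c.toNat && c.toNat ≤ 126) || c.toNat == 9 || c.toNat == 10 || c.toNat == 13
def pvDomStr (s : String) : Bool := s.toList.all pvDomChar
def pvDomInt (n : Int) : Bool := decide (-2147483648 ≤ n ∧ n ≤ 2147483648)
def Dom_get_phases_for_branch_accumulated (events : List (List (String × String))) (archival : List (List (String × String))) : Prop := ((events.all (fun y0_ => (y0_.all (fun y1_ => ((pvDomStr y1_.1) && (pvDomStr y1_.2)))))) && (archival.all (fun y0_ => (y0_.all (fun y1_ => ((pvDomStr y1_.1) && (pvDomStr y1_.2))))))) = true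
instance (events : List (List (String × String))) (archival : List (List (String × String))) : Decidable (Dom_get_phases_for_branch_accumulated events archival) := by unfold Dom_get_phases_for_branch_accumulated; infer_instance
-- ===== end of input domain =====

-- B replaces A's manual two-pass ordered insertion by a single sorted() call with a
-- rank-dict key (rank.get(p, len(rank)), p); objective: idiomatic (no speed claim).

-- ===== PORT A =====
-- loop body of A's two identical for-loops: if r.get("phase"): phases.add(r["phase"])
def pvPhaseStep (s : PySem.Set String) (r : List (String × String)) : PySem.Set String :=
  match PySem.Dict.get? (PySem.Dict.mk r) "phase" with
  | some v => if v ≠ "" then PySem.Set.add s v else s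
  | none => s

-- helper _sort_phases of A
def pv_sort_phases (phases : PySem.Set String) : List String :=
  let phase_order : List String := ["phase0", "phase1", "phase2", "phase3", "phase4", "summary"]
  let sorted_phases : List String :=
    phase_order.foldl (fun acc p => if PySem.Set.contains phases p then acc ++ [p] else acc) []
  (PySem.List.sorted phases (fun x => x) false).foldl
    (fun acc p => if acc.contains p then acc else acc ++ [p]) sorted_phases

def get_phases_for_branch_accumulated (events : List (List (String × String))) (archival : List (List (String × String))) : List String :=
  let phases : PySem.Set String := PySem.Set.empty
  let phases := events.foldl pvPhaseStep phases
  let phases := archival.foldl pvPhaseStep phases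
  let phases := if !events.isEmpty || !archival.isEmpty then PySem.Set.add phases "summary" else phases
  pv_sort_phases phases

-- ===== PORT B =====
-- the set-comprehension filter: r["phase"] if r.get("phase") is truthy
def pvGetPhase? (r : List (String × String)) : Option String :=
  match PySem.Dict.get? (PySem.Dict.mk r) "phase" with
  | some v => if v ≠ "" then some v else none
  | none => none

def get_phases_for_branch_accumulated_alt (events : List (List (String × String))) (archival : List (List (String × String))) : List String :=
  let order : List String := ["phase0", "phase1", "phase2", "phase3", "phase4", "summary"]
  let rank : PySem.Dict String Int :=
    (PySem.List.enumerate order 0).foldl (fun d ip => PySem.Dict.insert d ip.2 ip.1) PySem.Dict.empty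
  let phases : PySem.Set String := PySem.Set.ofList ((events ++ archival).filterMap pvGetPhase?)
  let phases := if !events.isEmpty || !archival.isEmpty then PySem.Set.add phases "summary" else phases
  PySem.List.sorted2 phases (fun p => PySem.Dict.getD rank p ((PySem.Dict.size rank : Int))) (fun p => p) false

-- ===== PRECONDITION & SPEC =====
def Spec_get_phases_for_branch_accumulated (events : List (List (String × String))) (archival : List (List (String × String))) (out : List String) : Prop := out = get_phases_for_branch_accumulated_alt events archival
instance (events : List (List (String × String))) (archival : List (List (String × String))) (out : List String) : Decidable (Spec_get_phases_for_branch_accumulated events archival out) := by unfold Spec_get_phases_for_branch_accumulated; infer_instance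

-- ===== CLAIM (what is proved, stated in full; the proofs are below) =====
def Claim_equal_get_phases_for_branch_accumulated : Prop := ∀ (events : List (List (String × String))) (archival : List (List (String × String))), Dom_get_phases_for_branch_accumulated events archival → Spec_get_phases_for_branch_accumulated events archival (get_phases_for_branch_accumulated events archival)

-- ===== LEMMAS AND PROOFS =====

def pvOrderL : List String := ["phase0", "phase1", "phase2", "phase3", "phase4", "summary"]

def pvRankD : PySem.Dict String Int :=
  PySem.Dict.mk [("phase0", 0), ("phase1", 1), ("phase2", 2), ("phase3", 3), ("phase4", 4), ("summary", 5)]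

def pvKey (p : String) : Lex (Int × String) := toLex (PySem.Dict.getD pvRankD p 6, p)

theorem pv_lex_bool (x y : Int) (s t : String) :
    (decide (x < y) || (!decide (y < x) && decide (s < t))) = decide (toLex (x, s) < toLex (y, t)) := by
  rw [Bool.eq_iff_iff]
  simp only [Bool.or_eq_true, Bool.and_eq_true, Bool.not_eq_true', decide_eq_true_eq,
    decide_eq_false_iff_not, Prod.Lex.lt_iff, ofLex_toLex]
  constructor
  · rintro (h | ⟨hnl, hst⟩)
    · exact Or.inl h
    · rcases eq_or_lt_of_le (le_of_not_gt hnl) with he | hl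
      · exact Or.inr ⟨he, hst⟩
      · exact Or.inl hl
  · rintro (h | ⟨he, hst⟩)
    · exact Or.inl h
    · subst he; exact Or.inr ⟨lt_irrefl x, hst⟩

theorem pv_sorted2_eq_sorted_lex (xs : List String) :
    PySem.List.sorted2 xs (fun p => PySem.Dict.getD pvRankD p 6) (fun p => p) false
      = PySem.List.sorted xs pvKey false := by
  show List.foldl _ [] xs = List.foldl _ [] xs
  congr 1
  funext acc a
  congr 1
  funext p q
  exact pv_lex_bool _ _ _ _

theorem pv_foldl_step (l : List (List (String × String))) (s : PySem.Set String) :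
    l.foldl pvPhaseStep s = (l.filterMap pvGetPhase?).foldl PySem.Set.add s := by
  induction l generalizing s with
  | nil => rfl
  | cons r t ih =>
      simp only [List.foldl_cons, List.filterMap_cons]
      rcases hg : PySem.Dict.get? (PySem.Dict.mk r) "phase" with _ | v
      · simp [pvPhaseStep, pvGetPhase?, hg, ih]
      · by_cases hv : v = ""
        · simp [pvPhaseStep, pvGetPhase?, hg, hv, ih]
        · simp [pvPhaseStep, pvGetPhase?, hg, hv, ih]

theorem pv_foldl_filter (S : PySem.Set String) (l : List String) (init : List String) :
    l.foldl (fun acc p => if PySem.Set.contains S p then acc ++ [p] else acc) init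
      = init ++ l.filter (fun p => PySem.Set.contains S p) := by
  induction l generalizing init with
  | nil => simp
  | cons p t ih =>
      simp only [List.foldl_cons, List.filter_cons]
      by_cases h : PySem.Set.contains S p = true
      · rw [if_pos h, if_pos h, ih]
        simp
      · rw [if_neg h, if_neg h, ih]

theorem pv_foldl_dedup (l : List String) (hl : l.Nodup) (init : List String) :
    l.foldl (fun acc p => if acc.contains p then acc else acc ++ [p]) init
      = init ++ l.filter (fun p => !init.contains p) := by
  induction l generalizing init with
  | nil => simp
  | cons p t ih =>
      obtain ⟨hp, ht⟩ := List.nodup_cons.mp hl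
      simp only [List.foldl_cons, List.filter_cons]
      by_cases h : init.contains p = true
      · have hm : p ∈ init := by simpa [List.contains_iff_mem] using h
        rw [if_pos h, ih ht init]
        simp [hm]
      · rw [if_neg h, ih ht (init ++ [p])]
        have heq : t.filter (fun q => !(init ++ [p]).contains q) = t.filter (fun q => !init.contains q) := by
          apply List.filter_congr
          intro q hq
          have hqp : q ≠ p := fun e => hp (e ▸ hq)
          simp [hqp]
        have hm : p ∉ init := by simpa [List.contains_iff_mem] using h
        rw [heq]
        simp [hm]

theorem pv_rank_notmem {p : String} (h : p ∉ pvOrderL) : PySem.Dict.getD pvRankD p 6 = 6 := by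
  simp only [pvOrderL, List.mem_cons, List.not_mem_nil, or_false, not_or] at h
  obtain ⟨h0, h1, h2, h3, h4, h5⟩ := h
  simp [pvRankD, PySem.Dict.getD, PySem.Dict.get?_mk_cons, beq_iff_eq,
    Ne.symm h0, Ne.symm h1, Ne.symm h2, Ne.symm h3, Ne.symm h4, Ne.symm h5, PySem.Dict.get?_empty,
    show PySem.Dict.mk ([] : List (String × Int)) = PySem.Dict.empty from rfl]

theorem pv_rank_mem {a : String} (h : a ∈ pvOrderL) : PySem.Dict.getD pvRankD a 6 < 6 := by
  fin_cases h <;> decide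

theorem pv_key_lt_of_mem_notmem {a b : String} (ha : a ∈ pvOrderL) (hb : b ∉ pvOrderL) :
    pvKey a < pvKey b := by
  have h1 := pv_rank_mem ha
  have h2 := pv_rank_notmem hb
  unfold pvKey
  rw [Prod.Lex.lt_iff]
  left
  simpa [h2] using h1

theorem pv_key_lt_of_lt_notmem {a b : String} (ha : a ∉ pvOrderL) (hb : b ∉ pvOrderL)
    (h : a < b) : pvKey a < pvKey b := by
  unfold pvKey
  rw [Prod.Lex.lt_iff]
  right
  simp [pv_rank_notmem ha, pv_rank_notmem hb, h]

theorem pv_pairwise_lift {l : List String} (h : l.Pairwise (fun a b : String => a < b))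
    (hmem : ∀ p ∈ l, p ∉ pvOrderL) : l.Pairwise (fun a b => pvKey a < pvKey b) := by
  induction l with
  | nil => exact List.Pairwise.nil
  | cons x t ih =>
      rcases List.pairwise_cons.mp h with ⟨hx, ht⟩
      refine List.pairwise_cons.mpr ⟨?_, ih ht (fun p hp => hmem p (List.mem_cons_of_mem _ hp))⟩
      intro b hb
      exact pv_key_lt_of_lt_notmem (hmem x List.mem_cons_self)
        (hmem b (List.mem_cons_of_mem _ hb)) (hx b hb)

-- the heart: A's two-pass ordered insertion equals sorting by the lexicographic rank key
theorem pv_sort_phases_eq (S : PySem.Set String) (hN : S.Nodup) :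
    pv_sort_phases S = PySem.List.sorted S pvKey false := by
  have hNod : pvOrderL.Nodup := by decide
  have hsortN : (PySem.List.sorted S (fun x : String => x) false).Nodup :=
    (PySem.List.sorted_perm S (fun x : String => x) false).symm.nodup hN
  have hsortPW : (PySem.List.sorted S (fun x : String => x) false).Pairwise (· < ·) := by
    have h1 := PySem.List.sorted_pairwise S (fun x : String => x)
    exact (h1.and hsortN).imp (fun h => lt_of_le_of_ne h.1 h.2)
  set F : List String := List.filter (fun p => PySem.Set.contains S p) pvOrderL with hF
  set G : List String :=
    List.filter (fun p => !F.contains p) (PySem.List.sorted S (fun x : String => x) false) with hG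
  have hmemF : ∀ p : String, p ∈ F ↔ p ∈ pvOrderL ∧ p ∈ S := by
    intro p
    rw [hF]
    simp [List.mem_filter, PySem.Set.contains]
  have hmemG : ∀ p : String, p ∈ G ↔ p ∈ S ∧ p ∉ pvOrderL := by
    intro p
    rw [hG, List.mem_filter, PySem.List.mem_sorted]
    have hbool : ((!F.contains p) = true) ↔ p ∉ F := by
      rw [Bool.not_eq_true']
      constructor
      · intro h hm
        rw [List.contains_iff_mem.mpr hm] at h
        exact Bool.noConfusion h
      · intro hn
        cases hcc : F.contains p with
        | false => rfl
        | true => exact absurd (List.contains_iff_mem.mp hcc) hn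
    rw [hbool]
    constructor
    · rintro ⟨hpS, hc⟩
      exact ⟨hpS, fun ho => hc ((hmemF p).mpr ⟨ho, hpS⟩)⟩
    · rintro ⟨hpS, ho⟩
      exact ⟨hpS, fun hpF => ho ((hmemF p).mp hpF).1⟩
  have hLHS : pv_sort_phases S = F ++ G := by
    have h1 : pv_sort_phases S
        = (PySem.List.sorted S (fun x : String => x) false).foldl
            (fun acc p => if acc.contains p then acc else acc ++ [p])
            (pvOrderL.foldl (fun acc p => if PySem.Set.contains S p then acc ++ [p] else acc) []) := rfl
    rw [h1, pv_foldl_filter, pv_foldl_dedup _ hsortN, List.nil_append, ← hF, ← hG]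
  rw [hLHS]
  refine (PySem.List.sorted_eq_of_perm_of_pairwise_lt S (F ++ G) pvKey ?_ ?_).symm
  · have hnodFG : (F ++ G).Nodup := by
      rw [List.nodup_append]
      exact ⟨hF ▸ hNod.filter _, hG ▸ hsortN.filter _,
        fun a haF b hbG h => ((hmemG b).mp hbG).2 (h ▸ ((hmemF a).mp haF).1)⟩
    rw [List.perm_ext_iff_of_nodup hnodFG hN]
    intro a
    simp only [List.mem_append, hmemF a, hmemG a]
    by_cases h : a ∈ pvOrderL <;> simp [h]
  · rw [List.pairwise_append]
    refine ⟨?_, ?_, ?_⟩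
    · exact hF ▸ List.Pairwise.filter _ (by decide : pvOrderL.Pairwise (fun a b => pvKey a < pvKey b))
    · exact pv_pairwise_lift (hG ▸ (hsortPW.filter _)) (fun p hp => ((hmemG p).mp hp).2)
    · intro a haF b hbG
      exact pv_key_lt_of_mem_notmem ((hmemF a).mp haF).1 ((hmemG b).mp hbG).2

-- ===== VERDICT (by name: the statement is the Claim_ definition above) =====
theorem get_phases_for_branch_accumulated_spec : Claim_equal_get_phases_for_branch_accumulated := by
  intro events archival _
  unfold Spec_get_phases_for_branch_accumulated
  set R : PySem.Dict String Int :=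
    (PySem.List.enumerate (["phase0", "phase1", "phase2", "phase3", "phase4", "summary"] : List String) 0).foldl
      (fun d ip => PySem.Dict.insert d ip.2 ip.1) PySem.Dict.empty with hR
  have hA : get_phases_for_branch_accumulated events archival
      = pv_sort_phases (if !events.isEmpty || !archival.isEmpty
          then PySem.Set.add (List.foldl pvPhaseStep (List.foldl pvPhaseStep PySem.Set.empty events) archival) "summary"
          else List.foldl pvPhaseStep (List.foldl pvPhaseStep PySem.Set.empty events) archival) := rfl
  have hB : get_phases_for_branch_accumulated_alt events archival
      = PySem.List.sorted2 (if !events.isEmpty || !archival.isEmpty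
          then PySem.Set.add (PySem.Set.ofList ((events ++ archival).filterMap pvGetPhase?)) "summary"
          else PySem.Set.ofList ((events ++ archival).filterMap pvGetPhase?))
          (fun p => PySem.Dict.getD R p ((PySem.Dict.size R : Int))) (fun p => p) false := rfl
  have hRD : R = pvRankD := by rw [hR]; decide
  have hsize : ((PySem.Dict.size pvRankD : Int)) = 6 := by decide
  have hS : List.foldl pvPhaseStep (List.foldl pvPhaseStep PySem.Set.empty events) archival
      = PySem.Set.ofList ((events ++ archival).filterMap pvGetPhase?) := by
    rw [pv_foldl_step, pv_foldl_step, PySem.Set.ofList_eq_foldl, List.filterMap_append,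
      List.foldl_append]
    rfl
  rw [hA, hB, hRD, hsize, pv_sorted2_eq_sorted_lex, hS]
  apply pv_sort_phases_eq
  by_cases h : (!events.isEmpty || !archival.isEmpty) = true
  · rw [if_pos h]
    exact PySem.Set.nodup_add _ _ (PySem.Set.nodup_ofList _)
  · rw [if_neg h]
    exact PySem.Set.nodup_ofList _
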